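-- pv_equiv track=rewrite | github.com/loociano/advent-of-code | aoc2019/src/day08/solution.py | compute_image
-- ===== SOURCE A (Python) =====
-- def compute_image(pixels: list, width: int, height: int) -> str:
--     num_layers = int(len(pixels) / (width * height))
--     message = []
--     for row in range(0, height):
--         line_str = []
--         for col in range(0, width):
--             color = 2  # transparent
--             for l in range(0, num_layers):
--                 color = pixels[(l * width * height) + (width * row) + col]
--                 if color == 0 or color == 1:  # black or white
--                     break
--             line_str.append('X' if color == 1 else ' ')
--         message.append(''.join(line_str))
--     return '\n'.join(message)
-- ===== SOURCE B (Python) =====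
-- def compute_image(pixels: list, width: int, height: int) -> str:
--     if width <= 0 or height <= 0:
--         # degenerate grid: no pixel cells to render
--         return '\n'.join('' for _ in range(height))
--     wh = width * height
--     num_layers = int(len(pixels) / wh)
--     buf = [None] * wh  # transparent sentinel
--     for l in range(num_layers):
--         base = l * wh
--         for i in range(wh):
--             if buf[i] is None:
--                 v = pixels[base + i]
--                 if v == 0 or v == 1:
--                     buf[i] = v
--     rows = []
--     for r in range(height):
--         rows.append(''.join('X' if buf[r * width + c] == 1 else ' ' for c in range(width)))
--     return '\n'.join(rows)
-- ===== Notes on version B (the rewrite author's own statement) =====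
-- stated objective: alternative
-- what changed: Replaces A's per-pixel scan over all layers (three nested loops, innermost with break) by a layer-major single-buffer overlay: one pass over the layers fills a width*height buffer at still-transparent positions, then the buffer is rendered into rows.
import Mathlib
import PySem

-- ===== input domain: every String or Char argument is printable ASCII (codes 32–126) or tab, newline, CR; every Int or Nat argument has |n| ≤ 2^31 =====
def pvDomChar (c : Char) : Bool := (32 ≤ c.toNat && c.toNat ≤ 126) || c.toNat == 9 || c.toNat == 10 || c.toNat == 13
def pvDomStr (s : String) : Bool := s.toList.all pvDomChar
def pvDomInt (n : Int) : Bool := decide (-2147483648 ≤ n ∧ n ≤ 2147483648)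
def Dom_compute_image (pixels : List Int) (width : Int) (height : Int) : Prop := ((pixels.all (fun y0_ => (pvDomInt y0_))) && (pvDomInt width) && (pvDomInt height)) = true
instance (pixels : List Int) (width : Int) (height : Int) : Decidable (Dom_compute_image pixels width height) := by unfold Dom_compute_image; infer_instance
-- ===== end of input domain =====

-- B replaces A's per-pixel scan over all layers by a layer-major overlay into one
-- width*height buffer filled at still-transparent positions (alternative decomposition).

-- ===== PORT A =====
-- inner 'for l in range(0, num_layers): color = pixels[...]; if color in {0,1}: break'
-- (index is always in range when this loop runs under Pre_, so the default 2 is never returned)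
def pvColorLoop (pixels : List Int) (width height row col : Int) : List Int → Int → Int
  | [], color => color
  | l :: ls, _ =>
    let color := PySem.List.pyGetD pixels (l * width * height + width * row + col) 2
    if color = 0 ∨ color = 1 then color else pvColorLoop pixels width height row col ls color

def compute_image (pixels : List Int) (width : Int) (height : Int) : String :=
  -- int(len(pixels) / (width*height)): true division then truncation toward zero;
  -- exact at these magnitudes, ported as Int.tdiv
  let num_layers := Int.tdiv (pixels.length : Int) (width * height)
  PySem.Str.join "\n" ((PySem.List.pyRange 0 height 1).map (fun row =>
    String.mk ((PySem.List.pyRange 0 width 1).map (fun col =>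
      if pvColorLoop pixels width height row col (PySem.List.pyRange 0 num_layers 1) 2 = 1
      then 'X' else ' '))))

-- ===== PORT B =====
-- one layer pass: fill still-None buffer cells with this layer's 0/1 pixels
-- (i ≥ 0 inside range(wh), so buf.set i.toNat is exactly Python's buf[i] = v)
def pvLayerPass (pixels : List Int) (wh base : Int) (buf : List (Option Int)) : List (Option Int) :=
  (PySem.List.pyRange 0 wh 1).foldl (fun buf i =>
    if PySem.List.pyGetD buf i none = none then
      let v := PySem.List.pyGetD pixels (base + i) 2
      if v = 0 ∨ v = 1 then buf.set i.toNat (some v) else buf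
    else buf) buf

def compute_image_alt (pixels : List Int) (width : Int) (height : Int) : String :=
  -- degenerate grid: no pixel cells to render
  if width ≤ 0 ∨ height ≤ 0 then
    PySem.Str.join "\n" ((PySem.List.pyRange 0 height 1).map (fun _ => "")) else
  let wh := width * height
  let num_layers := Int.tdiv (pixels.length : Int) wh
  -- [None] * wh (empty when wh < 0)
  let buf := (PySem.List.pyRange 0 num_layers 1).foldl
      (fun buf l => pvLayerPass pixels wh (l * wh) buf)
      (List.replicate (max wh 0).toNat none)
  PySem.Str.join "\n" ((PySem.List.pyRange 0 height 1).map (fun r =>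
    String.mk ((PySem.List.pyRange 0 width 1).map (fun c =>
      if PySem.List.pyGetD buf (r * width + c) none = some 1 then 'X' else ' '))))

-- ===== PRECONDITION & SPEC =====
-- Pre_ excludes only width*height == 0, where Python A raises ZeroDivisionError.
def Pre_compute_image (pixels : List Int) (width : Int) (height : Int) : Prop :=
  width * height ≠ 0
instance (pixels : List Int) (width : Int) (height : Int) : Decidable (Pre_compute_image pixels width height) := by unfold Pre_compute_image; infer_instance

def pvWitness_compute_image : List Int × Int × Int := ([2, 0, 1, 2, 1, 1, 0, 0], 2, 2)

def Spec_compute_image (pixels : List Int) (width : Int) (height : Int) (out : String) : Prop := out = compute_image_alt pixels width height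
instance (pixels : List Int) (width : Int) (height : Int) (out : String) : Decidable (Spec_compute_image pixels width height out) := by unfold Spec_compute_image; infer_instance

-- ===== CLAIM (what is proved, stated in full; the proofs are below) =====
def Claim_equal_compute_image : Prop := ∀ (pixels : List Int) (width : Int) (height : Int), Dom_compute_image pixels width height → Pre_compute_image pixels width height → Spec_compute_image pixels width height (compute_image pixels width height)

-- ===== LEMMAS AND PROOFS =====

-- first layer value in {0,1} at flat position i, scanning the given layer indices
def pvFirstHit (pixels : List Int) (wh i : Int) (L : List Int) : Option Int :=
  L.findSome? (fun l =>
    let v := PySem.List.pyGetD pixels (l * wh + i) 2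
    if v = 0 ∨ v = 1 then some v else none)

theorem pvColorLoop_eq_one_iff (pixels : List Int) (w h row col : Int) (L : List Int) (c : Int) (hc : c ≠ 1) :
    (pvColorLoop pixels w h row col L c = 1) ↔ pvFirstHit pixels (w * h) (w * row + col) L = some 1 := by
  induction L generalizing c with
  | nil => simp [pvColorLoop, pvFirstHit, hc]
  | cons l ls ih =>
    have harith : l * w * h + (w * row + col) = l * (w * h) + (w * row + col) := by ring
    simp only [pvColorLoop, pvFirstHit, List.findSome?_cons] at *
    rw [show l * w * h + w * row + col = l * (w * h) + (w * row + col) by ring]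
    by_cases hv : PySem.List.pyGetD pixels (l * (w * h) + (w * row + col)) 2 = 0 ∨
                  PySem.List.pyGetD pixels (l * (w * h) + (w * row + col)) 2 = 1
    · simp only [hv, if_pos, Option.some.injEq]
    · have hne1 : PySem.List.pyGetD pixels (l * (w * h) + (w * row + col)) 2 ≠ 1 := fun h1 => hv (Or.inr h1)
      simp only [hv, ite_false]
      exact ih _ hne1

theorem pvStepFold_length (pixels : List Int) (base : Int) (L : List Int) (buf : List (Option Int)) :
    (L.foldl (fun buf i =>
      if PySem.List.pyGetD buf i none = none then
        let v := PySem.List.pyGetD pixels (base + i) 2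
        if v = 0 ∨ v = 1 then buf.set i.toNat (some v) else buf
      else buf) buf).length = buf.length := by
  induction L generalizing buf with
  | nil => rfl
  | cons i L ih =>
    simp only [List.foldl_cons]
    rw [ih]
    split_ifs <;> simp

theorem pvLayerPass_length (pixels : List Int) (wh base : Int) (buf : List (Option Int)) :
    (pvLayerPass pixels wh base buf).length = buf.length :=
  pvStepFold_length pixels base _ buf

theorem pvStepFold_getElem? (pixels : List Int) (base : Int) (L : List Int)
    (buf : List (Option Int)) (hL : ∀ x ∈ L, 0 ≤ x ∧ x < (buf.length : Int))
    (j : Nat) (hj : j < buf.length) :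
    (L.foldl (fun buf i =>
      if PySem.List.pyGetD buf i none = none then
        let v := PySem.List.pyGetD pixels (base + i) 2
        if v = 0 ∨ v = 1 then buf.set i.toNat (some v) else buf
      else buf) buf)[j]? =
      some (if (j : Int) ∈ L ∧ buf[j] = none ∧
          (PySem.List.pyGetD pixels (base + j) 2 = 0 ∨ PySem.List.pyGetD pixels (base + j) 2 = 1)
       then some (PySem.List.pyGetD pixels (base + j) 2) else buf[j]) := by
  induction L generalizing buf with
  | nil => simp [List.getElem?_eq_getElem hj]
  | cons i L ih =>
    obtain ⟨hi0, hilt⟩ := hL i (List.mem_cons_self ..)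
    have hitn : i.toNat < buf.length := by omega
    have hget : PySem.List.pyGetD buf i none = buf[i.toNat]'hitn :=
      PySem.List.pyGetD_eq_getElem buf none hi0 hilt
    have hL' : ∀ x ∈ L, 0 ≤ x ∧ x < (buf.length : Int) :=
      fun x hx => hL x (List.mem_cons_of_mem _ hx)
    simp only [List.foldl_cons]
    by_cases hbi : PySem.List.pyGetD buf i none = none
    · by_cases hgood : PySem.List.pyGetD pixels (base + i) 2 = 0 ∨ PySem.List.pyGetD pixels (base + i) 2 = 1
      · rw [if_pos hbi, if_pos hgood]
        rw [ih (buf.set i.toNat (some (PySem.List.pyGetD pixels (base + i) 2)))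
              (by simpa using hL') (by simpa using hj)]
        by_cases hij : (j : Int) = i
        · have hji : i.toNat = j := by omega
          have hbj : buf[i.toNat]'hitn = none := hget.symm.trans hbi
          simp only [hji] at hbj
          simp [hji, hij, hbj, hgood]
        · have hne : i.toNat ≠ j := by omega
          simp [List.getElem_set_ne hne, List.mem_cons, hij]
      · rw [if_pos hbi, if_neg hgood]
        rw [ih buf hL' hj]
        by_cases hij : (j : Int) = i
        · have hgj : ¬ (PySem.List.pyGetD pixels (base + (j : Int)) 2 = 0 ∨ PySem.List.pyGetD pixels (base + (j : Int)) 2 = 1) := by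
            rw [hij]; exact hgood
          simp [List.mem_cons, hgj]
        · simp [List.mem_cons, hij]
    · rw [if_neg hbi]
      rw [ih buf hL' hj]
      by_cases hij : (j : Int) = i
      · have hji : i.toNat = j := by omega
        have hbj : ¬ buf[j]'hj = none := by simp only [← hji, ← hget]; exact hbi
        simp [List.mem_cons, hbj]
      · simp [List.mem_cons, hij]

theorem pvOuterFold_length (pixels : List Int) (wh : Int) (N : List Int) (buf : List (Option Int)) :
    (N.foldl (fun buf l => pvLayerPass pixels wh (l * wh) buf) buf).length = buf.length := by
  induction N generalizing buf with
  | nil => rfl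
  | cons l N ih => simp only [List.foldl_cons]; rw [ih, pvLayerPass_length]

theorem pvOuterFold_getElem? (pixels : List Int) (wh : Int) (N : List Int)
    (buf : List (Option Int)) (hlen : (buf.length : Int) = wh)
    (j : Nat) (hj : j < buf.length) :
    (N.foldl (fun buf l => pvLayerPass pixels wh (l * wh) buf) buf)[j]? =
      some ((buf[j]'hj).or (pvFirstHit pixels wh (j : Int) N)) := by
  induction N generalizing buf with
  | nil => simp [pvFirstHit, List.getElem?_eq_getElem hj]
  | cons l N ih =>
    simp only [List.foldl_cons]
    have hlen2 : (pvLayerPass pixels wh (l * wh) buf).length = buf.length :=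
      pvLayerPass_length pixels wh (l * wh) buf
    rw [ih (pvLayerPass pixels wh (l * wh) buf) (by rw [hlen2]; exact hlen) (by rw [hlen2]; exact hj)]
    have hLb : ∀ x ∈ PySem.List.pyRange 0 wh 1, 0 ≤ x ∧ x < (buf.length : Int) := by
      intro x hx
      rw [PySem.List.mem_pyRange_one] at hx
      omega
    have hpass0 := pvStepFold_getElem? pixels (l * wh) (PySem.List.pyRange 0 wh 1) buf hLb j hj
    rw [List.getElem?_eq_getElem (by rw [pvStepFold_length]; exact hj)] at hpass0
    have hpass : (pvLayerPass pixels wh (l * wh) buf)[j]'(by rw [hlen2]; exact hj) =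
        (if (j : Int) ∈ PySem.List.pyRange 0 wh 1 ∧ buf[j]'hj = none ∧
            (PySem.List.pyGetD pixels (l * wh + j) 2 = 0 ∨ PySem.List.pyGetD pixels (l * wh + j) 2 = 1)
         then some (PySem.List.pyGetD pixels (l * wh + j) 2) else buf[j]'hj) := by
      have := Option.some.inj hpass0
      simpa [pvLayerPass] using this
    rw [hpass]
    have hmem : (j : Int) ∈ PySem.List.pyRange 0 wh 1 := by
      rw [PySem.List.mem_pyRange_one]; omega
    cases hbj : buf[j]'hj with
    | some a => simp [pvFirstHit]
    | none =>
      by_cases hg : PySem.List.pyGetD pixels (l * wh + j) 2 = 0 ∨ PySem.List.pyGetD pixels (l * wh + j) 2 = 1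
      · simp [pvFirstHit, hg, hmem]
      · simp [pvFirstHit, hg, hmem]

theorem compute_image_spec : Claim_equal_compute_image := by
  intro pixels width height _ hpre
  unfold Pre_compute_image at hpre
  unfold Spec_compute_image
  simp only [compute_image, compute_image_alt]
  by_cases hh : 0 < height
  · by_cases hw : 0 < width
    · -- main case: width > 0 and height > 0
      have hwh : 0 < width * height := mul_pos hw hh
      rw [if_neg (by omega : ¬ (width ≤ 0 ∨ height ≤ 0))]
      congr 1
      apply List.map_congr_left
      intro row hrow
      rw [PySem.List.mem_pyRange_one] at hrow
      congr 1
      apply List.map_congr_left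
      intro col hcol
      rw [PySem.List.mem_pyRange_one] at hcol
      have hrowle : width * row ≤ width * (height - 1) :=
        mul_le_mul_of_nonneg_left (by omega) (le_of_lt hw)
      have hidxlt : width * row + col < width * height := by nlinarith
      have hidx0 : 0 ≤ width * row + col := by nlinarith
      -- the B-side buffer entry is the first hit
      have hbuflen : ((List.replicate (max (width * height) 0).toNat (none : Option Int)).length : Int) = width * height := by
        simp; omega
      have hjnat : (width * row + col).toNat < (List.replicate (max (width * height) 0).toNat (none : Option Int)).length := by
        simp; omega
      have hB := pvOuterFold_getElem? pixels (width * height)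
        (PySem.List.pyRange 0 (Int.tdiv (pixels.length : Int) (width * height)) 1)
        (List.replicate (max (width * height) 0).toNat (none : Option Int)) hbuflen
        (width * row + col).toNat hjnat
      rw [List.getElem?_eq_getElem (by rw [pvOuterFold_length]; exact hjnat)] at hB
      have hB' := Option.some.inj hB
      rw [List.getElem_replicate] at hB'
      rw [Option.none_or] at hB'
      have hcast : (((width * row + col).toNat : Int)) = width * row + col := by omega
      rw [hcast] at hB'
      have hBfin : PySem.List.pyGetD
          ((PySem.List.pyRange 0 (Int.tdiv (pixels.length : Int) (width * height)) 1).foldl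
            (fun buf l => pvLayerPass pixels (width * height) (l * (width * height)) buf)
            (List.replicate (max (width * height) 0).toNat (none : Option Int)))
          (row * width + col) none =
          pvFirstHit pixels (width * height) (width * row + col)
            (PySem.List.pyRange 0 (Int.tdiv (pixels.length : Int) (width * height)) 1) := by
        rw [show row * width + col = width * row + col by ring]
        rw [PySem.List.pyGetD_eq_getElem _ _ (by omega) (by rw [pvOuterFold_length]; omega)]
        exact hB'
      rw [hBfin]
      have hA := pvColorLoop_eq_one_iff pixels width height row col
        (PySem.List.pyRange 0 (Int.tdiv (pixels.length : Int) (width * height)) 1) 2 (by decide)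
      by_cases hc : pvColorLoop pixels width height row col
          (PySem.List.pyRange 0 (Int.tdiv (pixels.length : Int) (width * height)) 1) 2 = 1
      · rw [if_pos hc, if_pos (hA.mp hc)]
      · rw [if_neg hc, if_neg (fun h => hc (hA.mpr h))]
    · -- width ≤ 0: every row is the empty string on both sides
      rw [if_pos (Or.inl (by omega : width ≤ 0))]
      rw [PySem.List.pyRange_one_eq_nil (show width ≤ 0 by omega)]
      refine congrArg _ (List.map_congr_left ?_)
      intro x hx
      simp only [List.map_nil]
      decide
  · -- height ≤ 0: no rows on either side
    rw [if_pos (Or.inr (by omega : height ≤ 0))]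
    rw [PySem.List.pyRange_one_eq_nil (show height ≤ 0 by omega)]
    simp
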